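-- pv_equiv track=rewrite | github.com/courage-tci/lark_dynamic | lark_dynamic/utils.py | separated
-- ===== SOURCE A (Python) =====
-- from typing import Iterable, Sequence
--
-- def separated(parts: Iterable[Iterable[str]], sep: str) -> Iterable[str]:
--     is_first = True
--     for part in parts:
--         if not is_first:
--             yield sep
--         else:
--             is_first = False
--         yield from part
-- ===== SOURCE B (Python) =====
-- def separated(parts, sep):
--     flat = []
--     for part in parts:
--         flat.append(sep)
--         flat.extend(part)
--     yield from flat[1:]
-- ===== Notes on version B (the rewrite author's own statement) =====
-- stated objective: alternative
-- what changed: Instead of tracking which part is first, B builds a flat list by uniformly prefixing the separator to EVERY part and then yields that list with its leading separator sliced off (flat[1:]); no flag, no branch, a staged build-then-slice algorithm.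
import Mathlib
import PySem

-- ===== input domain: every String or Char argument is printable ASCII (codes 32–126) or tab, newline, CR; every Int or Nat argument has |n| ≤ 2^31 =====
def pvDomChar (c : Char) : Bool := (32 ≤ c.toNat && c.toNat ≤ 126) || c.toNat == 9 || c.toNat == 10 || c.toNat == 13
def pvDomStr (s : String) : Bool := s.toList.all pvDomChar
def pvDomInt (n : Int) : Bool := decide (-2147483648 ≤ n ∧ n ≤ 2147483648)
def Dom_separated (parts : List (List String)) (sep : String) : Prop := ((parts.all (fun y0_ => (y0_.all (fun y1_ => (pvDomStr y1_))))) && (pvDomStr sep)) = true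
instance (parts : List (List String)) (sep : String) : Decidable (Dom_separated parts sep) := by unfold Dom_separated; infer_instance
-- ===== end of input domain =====

-- B replaces A's first-element flag with a staged algorithm: prefix sep to EVERY part, then slice off the leading sep (flat[1:]).

-- ===== PORT A =====
-- loop state: (yielded output so far, is_first)
def separated (parts : List (List String)) (sep : String) : List String :=
  (parts.foldl
    (fun (st : List String × Bool) part =>
      if !st.2 then (st.1 ++ (sep :: part), st.2)   -- if not is_first: yield sep
      else (st.1 ++ part, false))                   -- else: is_first = False
    ([], true)).1

-- ===== PORT B =====
def separated_alt (parts : List (List String)) (sep : String) : List String :=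
  let flat := parts.foldl (fun flat part => flat ++ (sep :: part)) []  -- append sep, extend part
  PySem.List.slice flat (some 1) none                                  -- yield from flat[1:]

-- ===== PRECONDITION & SPEC =====
def Spec_separated (parts : List (List String)) (sep : String) (out : List String) : Prop := out = separated_alt parts sep
instance (parts : List (List String)) (sep : String) (out : List String) : Decidable (Spec_separated parts sep out) := by unfold Spec_separated; infer_instance

-- ===== CLAIM (what is proved, stated in full; the proofs are below) =====
def Claim_equal_separated : Prop := ∀ (parts : List (List String)) (sep : String), Dom_separated parts sep → Spec_separated parts sep (separated parts sep)

-- ===== LEMMAS AND PROOFS =====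

-- once A's flag is false, its remaining fold appends sep :: part for each part
theorem sepA_false (sep : String) (l : List (List String)) (acc : List String) :
    (l.foldl
      (fun (st : List String × Bool) part =>
        if !st.2 then (st.1 ++ (sep :: part), st.2)
        else (st.1 ++ part, false))
      (acc, false)).1 = acc ++ l.flatMap (fun part => sep :: part) := by
  induction l generalizing acc with
  | nil => simp
  | cons p t ih =>
    rw [List.foldl_cons,
      show (if (!(false : Bool)) = true then (acc ++ sep :: p, (false : Bool)) else (acc ++ p, false))
          = (acc ++ sep :: p, false) from rfl,
      ih]
    simp

-- B's build loop accumulates the same flatMap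
theorem sepB_fold (sep : String) (l : List (List String)) (acc : List String) :
    l.foldl (fun acc part => acc ++ (sep :: part)) acc
      = acc ++ l.flatMap (fun part => sep :: part) := by
  induction l generalizing acc with
  | nil => simp
  | cons p t ih =>
    simp only [List.foldl]
    rw [ih]
    simp [List.flatMap_cons]

-- ===== VERDICT (by name: the statement is the Claim_ definition above) =====
theorem separated_spec : Claim_equal_separated := by
  intro parts sep _
  unfold Spec_separated separated separated_alt
  rw [sepB_fold, PySem.List.slice_from_one]
  cases parts with
  | nil => rfl
  | cons first rest =>
    simp only [List.foldl]
    rw [show (if !(true : Bool) then (([] : List String) ++ (sep :: first), true) else ([] ++ first, false)) = (first, false) by simp]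
    rw [sepA_false]
    simp
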